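-- pv_equiv track=rewrite | github.com/MaiAnhBao/EulerPython | Euler.py | Rad_Sieve
-- ===== SOURCE A (Python) =====
-- def Rad_Sieve(N):
--     l = [1]*(N)
--     for i in range(1,N):
--         if l[i] == 1:
--             l[i] = i
--             for j in range(2*i,N,i):
--                 l[j] *= i
--     return l
-- ===== SOURCE B (Python) =====
-- def Rad_Sieve(N):
--     # Smallest-prime-factor table, then factor each number independently:
--     # the radical of n is the product of its distinct primes, collected by
--     # repeatedly reading spf[m] and dividing that prime out completely.
--     spf = [0] * N
--     for i in range(2, N):
--         if spf[i] == 0: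
--             for j in range(i, N, i):
--                 if spf[j] == 0:
--                     spf[j] = i
--     res = [1] * N
--     for n in range(2, N):
--         r = 1
--         m = n
--         while m > 1:
--             p = spf[m]
--             r *= p
--             while m % p == 0:
--                 m //= p
--         res[n] = r
--     return res
-- ===== Notes on version B (the rewrite author's own statement) =====
-- stated objective: alternative
-- what changed: Replaces A's multiplicative sieve (primes detected as leftover 1-entries, each prime multiplied into all its multiples) by a smallest-prime-factor table built with a marking sieve followed by an independent factorisation of each number against that table, collecting each distinct prime once.
import Mathlib
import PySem

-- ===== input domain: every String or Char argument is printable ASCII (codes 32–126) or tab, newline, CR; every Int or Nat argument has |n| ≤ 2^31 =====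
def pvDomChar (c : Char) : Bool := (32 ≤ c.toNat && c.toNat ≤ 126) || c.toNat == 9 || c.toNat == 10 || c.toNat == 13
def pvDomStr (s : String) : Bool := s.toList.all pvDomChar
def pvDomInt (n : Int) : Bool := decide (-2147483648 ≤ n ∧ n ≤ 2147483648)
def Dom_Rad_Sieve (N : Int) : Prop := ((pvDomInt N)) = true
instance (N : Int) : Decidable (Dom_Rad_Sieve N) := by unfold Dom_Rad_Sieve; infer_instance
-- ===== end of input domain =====

-- B replaces A's in-place multiplicative sieve by a smallest-prime-factor table plus an
-- independent factorisation of each number against it: a different algorithm, not faster.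

-- ===== PORT A =====
-- All indices i, j used below are nonnegative and in range (1 ≤ i < N, 2i ≤ j < N),
-- so pyGetD/pySetD are exact for Python's l[i] / l[j] = v.
def Rad_Sieve (N : Int) : List Int :=
  let l0 := List.replicate N.toNat (1 : Int)
  (PySem.List.pyRange 1 N 1).foldl (fun l i =>
    if PySem.List.pyGetD l i 0 == 1 then
      let l1 := PySem.List.pySetD l i i
      (PySem.List.pyRange (2*i) N i).foldl
        (fun l' j => PySem.List.pySetD l' j (PySem.List.pyGetD l' j 0 * i)) l1
    else l) l0

-- ===== PORT B =====
-- The two while-loops are ported as well-founded recursions on m; the dite guards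
-- (2 <= p, 0 < m, strictly decreasing m) only establish termination and are always
-- true when the loops run on the spf table the program builds.
def pvStrip (p m : Int) : Int :=
  if h : PySem.Int.mod m p == 0 ∧ 2 ≤ p ∧ 0 < m then pvStrip p (PySem.Int.floordiv m p)
  else m
termination_by m.toNat
decreasing_by
  obtain ⟨-, hp, hm⟩ := h
  rw [PySem.Int.floordiv_eq_ediv_of_pos (by omega)]
  have h1 : m / p < m := Int.ediv_lt_of_lt_mul (by omega) (by nlinarith)
  have h2 : 0 ≤ m / p := Int.ediv_nonneg (by omega) (by omega)
  omega

def pvRadLoop (spf : List Int) (m r : Int) : Int :=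
  if 1 < m then
    let p := PySem.List.pyGetD spf m 0
    let m' := pvStrip p m
    if h : m'.toNat < m.toNat then pvRadLoop spf m' (r * p) else r * p
  else r
termination_by m.toNat
decreasing_by exact h

def Rad_Sieve_alt (N : Int) : List Int :=
  let spf0 := List.replicate N.toNat (0 : Int)
  let spf := (PySem.List.pyRange 2 N 1).foldl (fun s i =>
    if PySem.List.pyGetD s i 0 == 0 then
      (PySem.List.pyRange i N i).foldl (fun s' j =>
        if PySem.List.pyGetD s' j 0 == 0 then PySem.List.pySetD s' j i else s') s
    else s) spf0
  let res0 := List.replicate N.toNat (1 : Int)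
  (PySem.List.pyRange 2 N 1).foldl (fun res n =>
    PySem.List.pySetD res n (pvRadLoop spf n 1)) res0

-- ===== PRECONDITION & SPEC =====
def Spec_Rad_Sieve (N : Int) (out : List Int) : Prop := out = Rad_Sieve_alt N
instance (N : Int) (out : List Int) : Decidable (Spec_Rad_Sieve N out) := by unfold Spec_Rad_Sieve; infer_instance

-- ===== CLAIM (what is proved, stated in full; the proofs are below) =====
def Claim_equal_Rad_Sieve : Prop := ∀ (N : Int), Dom_Rad_Sieve N → Spec_Rad_Sieve N (Rad_Sieve N)

-- ===== LEMMAS AND PROOFS =====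
def pvRad (j : ℕ) : ℕ := ∏ p ∈ j.primeFactors, p
def pvRadTo (j k : ℕ) : ℕ := ∏ p ∈ j.primeFactors.filter (fun p => p < k), p

lemma pvRadTo_one (j : ℕ) : pvRadTo j 1 = 1 := by
  unfold pvRadTo
  rw [Finset.filter_false_of_mem, Finset.prod_empty]
  intro p hp
  have := (Nat.mem_primeFactors.mp hp).1.two_le
  omega

lemma pvRadTo_two (j : ℕ) : pvRadTo j 2 = 1 := by
  unfold pvRadTo
  rw [Finset.filter_false_of_mem, Finset.prod_empty]
  intro p hp
  have := (Nat.mem_primeFactors.mp hp).1.two_le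
  omega

lemma pvRadTo_succ_not_mem {j k : ℕ} (h : k ∉ j.primeFactors) :
    pvRadTo j (k+1) = pvRadTo j k := by
  unfold pvRadTo
  congr 1
  apply Finset.filter_congr
  intro p hp
  constructor
  · intro hlt
    rcases Nat.lt_succ_iff_lt_or_eq.mp hlt with h' | h'
    · exact h'
    · exact absurd (h' ▸ hp) h
  · omega

lemma pvRadTo_succ_mem {j k : ℕ} (h : k ∈ j.primeFactors) :
    pvRadTo j (k+1) = pvRadTo j k * k := by
  unfold pvRadTo
  have hsplit : j.primeFactors.filter (fun p => p < k + 1)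
      = insert k (j.primeFactors.filter (fun p => p < k)) := by
    ext p
    simp only [Finset.mem_filter, Finset.mem_insert]
    constructor
    · rintro ⟨hp, hlt⟩
      rcases Nat.lt_succ_iff_lt_or_eq.mp hlt with h' | h'
      · exact Or.inr ⟨hp, h'⟩
      · exact Or.inl h'
    · rintro (rfl | ⟨hp, hlt⟩)
      · exact ⟨h, by omega⟩
      · exact ⟨hp, by omega⟩
  rw [hsplit, Finset.prod_insert (by simp), mul_comm]

lemma pvRadTo_self_of_prime {k : ℕ} (hk : k.Prime) : pvRadTo k k = 1 := by
  unfold pvRadTo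
  rw [hk.primeFactors]
  simp

lemma pvRadTo_self_ne_one {k : ℕ} (h2 : 2 ≤ k) (hk : ¬ k.Prime) : pvRadTo k k ≠ 1 := by
  unfold pvRadTo
  have hne1 : k ≠ 1 := by omega
  have hp := Nat.minFac_prime hne1
  have hlt : k.minFac < k := by
    rcases lt_or_eq_of_le (Nat.le_of_dvd (by omega) (Nat.minFac_dvd k)) with h | h
    · exact h
    · exact absurd (h ▸ hp) hk
  have hmem : k.minFac ∈ k.primeFactors.filter (fun p => p < k) := by
    simp only [Finset.mem_filter, Nat.mem_primeFactors]
    exact ⟨⟨hp, Nat.minFac_dvd k, by omega⟩, hlt⟩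
  have hle : k.minFac ≤ ∏ p ∈ k.primeFactors.filter (fun p => p < k), p :=
    Finset.single_le_prod' (fun i hi => ((Nat.mem_primeFactors.mp (Finset.mem_filter.mp hi).1).1.one_lt).le) hmem
  have := hp.two_le
  omega

lemma pvRadTo_eq_rad {j k : ℕ} (h : j < k) : pvRadTo j k = pvRad j := by
  unfold pvRadTo pvRad
  congr 1
  apply Finset.filter_true_of_mem
  intro p hp
  have := Nat.le_of_mem_primeFactors hp
  omega

-- A-side machinery: A's loop body, named so the invariant can speak about it
def pvBody (N : Int) : List Int → Int → List Int := fun l i =>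
  if PySem.List.pyGetD l i 0 == 1 then
    let l1 := PySem.List.pySetD l i i
    (PySem.List.pyRange (2*i) N i).foldl
      (fun l' j => PySem.List.pySetD l' j (PySem.List.pyGetD l' j 0 * i)) l1
  else l

lemma pvBody_eq (N : Int) :
    Rad_Sieve N = (PySem.List.pyRange 1 N 1).foldl (pvBody N) (List.replicate N.toNat 1) := rfl

lemma pvNodup_pyRange_of_pos (a b : Int) {s : Int} (hs : 0 < s) :
    (PySem.List.pyRange a b s).Nodup := by
  rw [PySem.List.pyRange_of_pos a b hs]
  refine List.nodup_range.map (fun k1 k2 h => ?_)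
  have h' : s * (k1 : Int) = s * (k2 : Int) := by omega
  have : (k1 : Int) = (k2 : Int) := by
    exact mul_left_cancel₀ (by omega) h'
  exact_mod_cast this

-- pointwise description of the inner multiply-at-indices fold
lemma pvInnerFold (i : Int) (n : ℕ) (js : List Int) (hnd : js.Nodup)
    (hb : ∀ x ∈ js, 0 ≤ x ∧ x < (n : Int)) :
    ∀ L : List Int, L.length = n →
      (js.foldl (fun l' j => PySem.List.pySetD l' j (PySem.List.pyGetD l' j 0 * i)) L).length = n ∧
      ∀ t, t < n → PySem.List.pyGetD
          (js.foldl (fun l' j => PySem.List.pySetD l' j (PySem.List.pyGetD l' j 0 * i)) L) (t : Int) 0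
        = if (t : Int) ∈ js then PySem.List.pyGetD L (t : Int) 0 * i
          else PySem.List.pyGetD L (t : Int) 0 := by
  induction js with
  | nil => intro L hL; simp [hL]
  | cons x xs ih =>
    intro L hL
    obtain ⟨hx0, hxn⟩ := hb x List.mem_cons_self
    have hxmem : x ∉ xs := (List.nodup_cons.mp hnd).1
    have hb' : ∀ y ∈ xs, 0 ≤ y ∧ y < (n : Int) := fun y hy => hb y (List.mem_cons_of_mem _ hy)
    have hxc : ((x.toNat : ℕ) : Int) = x := Int.toNat_of_nonneg hx0
    have hxlt : x.toNat < n := by omega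
    simp only [List.foldl_cons]
    set L1 := PySem.List.pySetD L x (PySem.List.pyGetD L x 0 * i) with hL1
    have hL1len : L1.length = n := by
      rw [hL1, PySem.List.pySetD_of_nonneg L _ hx0, List.length_set, hL]
    obtain ⟨ihlen, ihpt⟩ := ih (List.nodup_cons.mp hnd).2 hb' L1 hL1len
    refine ⟨ihlen, fun t ht => ?_⟩
    have hget : PySem.List.pyGetD L1 (t : Int) 0
        = if t = x.toNat then PySem.List.pyGetD L (t : Int) 0 * i
          else PySem.List.pyGetD L (t : Int) 0 := by
      rw [hL1, ← hxc, PySem.List.pyGetD_pySetD_natCast L _ _ _ _ (by omega), hxc]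
      split_ifs with h
      · rw [← hxc, h]
      · rfl
    rw [ihpt t ht, hget]
    by_cases hcase : t = x.toNat
    · have hxeq : (t : Int) = x := by rw [hcase]; exact hxc
      have hnotmem : (t : Int) ∉ xs := by rw [hxeq]; exact hxmem
      rw [if_neg hnotmem, if_pos hcase, if_pos (List.mem_cons.mpr (Or.inl hxeq))]
    · have hne : (t : Int) ≠ x := fun h => hcase (by omega)
      simp only [List.mem_cons, hne, false_or, if_neg hcase]

-- membership in the inner range, in ℕ terms
lemma pvMemRange (N : Int) (K j : ℕ) (hK : 1 ≤ K) (hj : j < N.toNat) :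
    ((j : Int) ∈ PySem.List.pyRange (2*(K : Int)) N (K : Int)) ↔ (2*K ≤ j ∧ K ∣ j) := by
  have hKpos : (0 : Int) < (K : Int) := by exact_mod_cast hK
  rw [PySem.List.mem_pyRange_iff_of_pos hKpos]
  have hjN : (j : Int) < N := by
    have : (j : Int) < (N.toNat : Int) := by exact_mod_cast hj
    omega
  constructor
  · rintro ⟨h1, -, h3⟩
    have hdvd : (K : Int) ∣ (j : Int) := by
      have := dvd_add h3 (dvd_mul_left (K : Int) 2)
      simpa using this
    exact ⟨by exact_mod_cast h1, by exact_mod_cast hdvd⟩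
  · rintro ⟨h1, h2⟩
    refine ⟨by exact_mod_cast h1, hjN, dvd_sub ?_ (dvd_mul_left (K : Int) 2)⟩
    exact_mod_cast h2

-- the key step: applying A's body for i = K updates entry j from pvRadTo j K to pvRadTo j (K+1)
lemma pvStep (N : Int) (K : ℕ) (hK : 1 ≤ K) (hKN : (K : Int) < N)
    (L : List Int) (hlen : L.length = N.toNat)
    (hpt : ∀ j, j < N.toNat → PySem.List.pyGetD L (j : Int) 0 = (pvRadTo j K : Int)) :
    (pvBody N L (K : Int)).length = N.toNat ∧
    ∀ j, j < N.toNat → PySem.List.pyGetD (pvBody N L (K : Int)) (j : Int) 0 = (pvRadTo j (K+1) : Int) := by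
  have hKn : K < N.toNat := by omega
  have hcondval : PySem.List.pyGetD L (K : Int) 0 = (pvRadTo K K : Int) := hpt K hKn
  unfold pvBody
  by_cases hone : pvRadTo K K = 1
  · -- condition true: K = 1 or K is prime
    have hKcase : K = 1 ∨ K.Prime := by
      rcases Nat.lt_or_ge K 2 with h | h
      · left; omega
      · right
        by_contra hnp
        exact pvRadTo_self_ne_one h hnp hone
    rw [hcondval]
    simp only [hone, Nat.cast_one, beq_self_eq_true, if_true]
    set L1 := PySem.List.pySetD L (K : Int) (K : Int) with hL1def
    have hL1len : L1.length = N.toNat := by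
      rw [hL1def, PySem.List.pySetD_natCast, List.length_set, hlen]
    have hL1pt : ∀ j, j < N.toNat → PySem.List.pyGetD L1 (j : Int) 0
        = if j = K then (K : Int) else (pvRadTo j K : Int) := by
      intro j hj
      rw [hL1def, PySem.List.pyGetD_pySetD_natCast L _ _ _ _ (by omega)]
      split_ifs with h
      · rfl
      · exact hpt j hj
    have hKpos : (0 : Int) < (K : Int) := by exact_mod_cast hK
    have hbounds : ∀ x ∈ PySem.List.pyRange (2*(K : Int)) N (K : Int), 0 ≤ x ∧ x < (N.toNat : Int) := by
      intro x hx
      rw [PySem.List.mem_pyRange_iff_of_pos hKpos] at hx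
      obtain ⟨h1, h2, -⟩ := hx
      constructor
      · omega
      · omega
    obtain ⟨hflen, hfpt⟩ := pvInnerFold (K : Int) N.toNat
      (PySem.List.pyRange (2*(K : Int)) N (K : Int))
      (pvNodup_pyRange_of_pos _ _ hKpos) hbounds L1 hL1len
    refine ⟨hflen, fun j hj => ?_⟩
    rw [hfpt j hj]
    have hmemiff := pvMemRange N K j hK hj
    by_cases hmem : ((j : Int) ∈ PySem.List.pyRange (2*(K : Int)) N (K : Int))
    · obtain ⟨hj2K, hdvd⟩ := hmemiff.mp hmem
      have hjK : j ≠ K := by omega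
      rw [if_pos hmem, hL1pt j hj, if_neg hjK]
      rcases hKcase with rfl | hp
      · simp [pvRadTo_one, pvRadTo_two]
      · have hmemf : K ∈ j.primeFactors :=
          Nat.mem_primeFactors.mpr ⟨hp, hdvd, by omega⟩
        rw [pvRadTo_succ_mem hmemf]
        push_cast
        ring
    · rw [if_neg hmem, hL1pt j hj]
      by_cases hjK : j = K
      · rw [if_pos hjK, hjK]
        rcases hKcase with rfl | hp
        · simp [pvRadTo_two]
        · have hmemf : K ∈ K.primeFactors :=
            Nat.mem_primeFactors.mpr ⟨hp, dvd_rfl, by omega⟩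
          rw [pvRadTo_succ_mem hmemf, pvRadTo_self_of_prime hp, one_mul]
      · rw [if_neg hjK]
        rcases hKcase with rfl | hp
        · simp [pvRadTo_one, pvRadTo_two]
        · have hnot : K ∉ j.primeFactors := by
            intro hmemf
            obtain ⟨-, hdvd, hj0⟩ := Nat.mem_primeFactors.mp hmemf
            obtain ⟨m, rfl⟩ := hdvd
            have hm2 : 2 ≤ m := by
              rcases Nat.lt_or_ge m 2 with h | h
              · interval_cases m <;> simp_all
              · exact h
            exact hmem (hmemiff.mpr ⟨by nlinarith, Dvd.intro m rfl⟩)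
          rw [pvRadTo_succ_not_mem hnot]
  · -- condition false: K ≥ 2 composite; nothing changes
    have hK2 : 2 ≤ K := by
      by_contra h
      have : K = 1 := by omega
      subst this
      exact hone (pvRadTo_one 1)
    have hnp : ¬ K.Prime := fun hp => hone (pvRadTo_self_of_prime hp)
    rw [hcondval]
    have : ((pvRadTo K K : Int) == 1) = false := by
      simp only [beq_eq_false_iff_ne, ne_eq]
      exact_mod_cast hone
    simp only [this, Bool.false_eq_true, if_false]
    refine ⟨hlen, fun j hj => ?_⟩
    rw [hpt j hj]
    have hnotmem : K ∉ j.primeFactors := fun hm => hnp (Nat.mem_primeFactors.mp hm).1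
    rw [pvRadTo_succ_not_mem hnotmem]

-- the invariant: after processing i = 1 .. K-1, entry j holds pvRadTo j K
lemma pvInv (N : Int) :
    ∀ K : ℕ, 1 ≤ K → (K : Int) ≤ N →
    ((PySem.List.pyRange 1 (K : Int) 1).foldl (pvBody N) (List.replicate N.toNat 1)).length = N.toNat ∧
    ∀ j, j < N.toNat →
      PySem.List.pyGetD
        ((PySem.List.pyRange 1 (K : Int) 1).foldl (pvBody N) (List.replicate N.toNat 1)) (j : Int) 0
        = (pvRadTo j K : Int) := by
  intro K
  induction K with
  | zero => omega
  | succ K ih =>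
    intro _ hKN
    rcases Nat.eq_zero_or_pos K with rfl | hKpos
    · -- K+1 = 1: no iterations yet
      rw [PySem.List.pyRange_one_eq_nil (by norm_num)]
      simp only [List.foldl_nil]
      refine ⟨by simp, fun j hj => ?_⟩
      rw [PySem.List.pyGetD_natCast, List.getD_replicate _ hj, pvRadTo_one]
      norm_num
    · have hKN' : (K : Int) ≤ N := by push_cast at hKN ⊢; omega
      obtain ⟨ihlen, ihpt⟩ := ih hKpos hKN'
      have hsplit : PySem.List.pyRange 1 ((K : Int) + 1) 1
          = PySem.List.pyRange 1 (K : Int) 1 ++ [(K : Int)] :=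
        PySem.List.pyRange_one_succ_right (by exact_mod_cast hKpos)
      push_cast
      rw [hsplit, List.foldl_append, List.foldl_cons, List.foldl_nil]
      exact pvStep N K hKpos (by push_cast at hKN ⊢; omega) _ ihlen ihpt

lemma pvA_eq_map (N : Int) :
    Rad_Sieve N = (List.range N.toNat).map (fun j => (pvRad j : Int)) := by
  by_cases hN : N ≤ 0
  · rw [pvBody_eq, PySem.List.pyRange_one_eq_nil (by omega)]
    simp [Int.toNat_of_nonpos hN]
  · have hN1 : 1 ≤ N := by omega
    obtain ⟨hlen, hpt⟩ := pvInv N N.toNat (by omega) (by omega)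
    have hcast : ((N.toNat : ℕ) : Int) = N := Int.toNat_of_nonneg (by omega)
    rw [pvBody_eq,
      show PySem.List.pyRange 1 N 1 = PySem.List.pyRange 1 ((N.toNat : ℕ) : Int) 1 by rw [hcast]]
    apply List.ext_getElem
    · rw [hlen, List.length_map, List.length_range]
    · intro j h1 h2
      have hj : j < N.toNat := by
        rw [List.length_map, List.length_range] at h2
        exact h2
      have := hpt j hj
      rw [PySem.List.pyGetD_natCast, List.getD_eq_getElem _ _ (by omega)] at this
      rw [this]
      simp only [List.getElem_map, List.getElem_range]
      rw [pvRadTo_eq_rad hj]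


-- ========== B-side proof ==========

-- the spf table's intended content after processing i = 2 .. K-1
def pvMinFacTo (m K : ℕ) : ℕ := if 2 ≤ m ∧ m.minFac < K then m.minFac else 0

-- pointwise description of the conditional-set fold used by the spf sieve
lemma pvCondSetFold (i : Int) (n : ℕ) (js : List Int) (hnd : js.Nodup)
    (hb : ∀ x ∈ js, 0 ≤ x ∧ x < (n : Int)) :
    ∀ L : List Int, L.length = n →
      (js.foldl (fun s' j => if PySem.List.pyGetD s' j 0 == 0 then PySem.List.pySetD s' j i else s') L).length = n ∧
      ∀ t, t < n → PySem.List.pyGetD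
          (js.foldl (fun s' j => if PySem.List.pyGetD s' j 0 == 0 then PySem.List.pySetD s' j i else s') L) (t : Int) 0
        = if (t : Int) ∈ js ∧ PySem.List.pyGetD L (t : Int) 0 = 0 then i
          else PySem.List.pyGetD L (t : Int) 0 := by
  induction js with
  | nil => intro L hL; simp [hL]
  | cons x xs ih =>
    intro L hL
    obtain ⟨hx0, hxn⟩ := hb x List.mem_cons_self
    have hxmem : x ∉ xs := (List.nodup_cons.mp hnd).1
    have hb' : ∀ y ∈ xs, 0 ≤ y ∧ y < (n : Int) := fun y hy => hb y (List.mem_cons_of_mem _ hy)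
    have hxc : ((x.toNat : ℕ) : Int) = x := Int.toNat_of_nonneg hx0
    have hxlt : x.toNat < n := by omega
    simp only [List.foldl_cons]
    set L1 := if PySem.List.pyGetD L x 0 == 0 then PySem.List.pySetD L x i else L with hL1
    have hL1len : L1.length = n := by
      rw [hL1]
      split_ifs
      · rw [PySem.List.pySetD_of_nonneg L _ hx0, List.length_set, hL]
      · exact hL
    obtain ⟨ihlen, ihpt⟩ := ih (List.nodup_cons.mp hnd).2 hb' L1 hL1len
    refine ⟨ihlen, fun t ht => ?_⟩
    have hget : PySem.List.pyGetD L1 (t : Int) 0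
        = if t = x.toNat ∧ PySem.List.pyGetD L (t : Int) 0 = 0 then i
          else PySem.List.pyGetD L (t : Int) 0 := by
      rw [hL1]
      by_cases hz : PySem.List.pyGetD L x 0 = 0
      · rw [if_pos (by simp [hz]), ← hxc, PySem.List.pyGetD_pySetD_natCast L _ _ _ _ (by omega), hxc]
        by_cases hcase : t = x.toNat
        · rw [if_pos hcase, if_pos ⟨hcase, by rw [hcase, hxc]; exact hz⟩]
        · rw [if_neg hcase, if_neg (fun hh => hcase hh.1)]
      · rw [if_neg (by simp [hz])]
        by_cases hcase : t = x.toNat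
        · rw [if_neg (fun hh => hz (by rw [← hxc, ← hcase]; exact hh.2))]
        · rw [if_neg (fun hh => hcase hh.1)]
    rw [ihpt t ht]
    by_cases hcase : t = x.toNat
    · have hxeq : (t : Int) = x := by rw [hcase]; exact hxc
      have hnotmem : (t : Int) ∉ xs := by rw [hxeq]; exact hxmem
      rw [if_neg (fun hh => hnotmem hh.1), hget]
      by_cases hz : PySem.List.pyGetD L (t : Int) 0 = 0
      · rw [if_pos ⟨hcase, hz⟩, if_pos ⟨List.mem_cons.mpr (Or.inl hxeq), hz⟩]
      · rw [if_neg (fun hh => hz hh.2), if_neg (fun hh => hz hh.2)]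
    · have hne : (t : Int) ≠ x := fun h => hcase (by omega)
      have hget2 : PySem.List.pyGetD L1 (t : Int) 0 = PySem.List.pyGetD L (t : Int) 0 := by
        rw [hget, if_neg (fun hh => hcase hh.1)]
      rw [hget2]
      simp only [List.mem_cons, hne, false_or]

-- pointwise description of the unconditional set fold writing g j at each index j
lemma pvSetFold (g : Int → Int) (n : ℕ) (js : List Int) (hnd : js.Nodup)
    (hb : ∀ x ∈ js, 0 ≤ x ∧ x < (n : Int)) :
    ∀ L : List Int, L.length = n →
      (js.foldl (fun res j => PySem.List.pySetD res j (g j)) L).length = n ∧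
      ∀ t, t < n → PySem.List.pyGetD
          (js.foldl (fun res j => PySem.List.pySetD res j (g j)) L) (t : Int) 0
        = if (t : Int) ∈ js then g (t : Int) else PySem.List.pyGetD L (t : Int) 0 := by
  induction js with
  | nil => intro L hL; simp [hL]
  | cons x xs ih =>
    intro L hL
    obtain ⟨hx0, hxn⟩ := hb x List.mem_cons_self
    have hxmem : x ∉ xs := (List.nodup_cons.mp hnd).1
    have hb' : ∀ y ∈ xs, 0 ≤ y ∧ y < (n : Int) := fun y hy => hb y (List.mem_cons_of_mem _ hy)
    have hxc : ((x.toNat : ℕ) : Int) = x := Int.toNat_of_nonneg hx0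
    have hxlt : x.toNat < n := by omega
    simp only [List.foldl_cons]
    set L1 := PySem.List.pySetD L x (g x) with hL1
    have hL1len : L1.length = n := by
      rw [hL1, PySem.List.pySetD_of_nonneg L _ hx0, List.length_set, hL]
    obtain ⟨ihlen, ihpt⟩ := ih (List.nodup_cons.mp hnd).2 hb' L1 hL1len
    refine ⟨ihlen, fun t ht => ?_⟩
    have hget : PySem.List.pyGetD L1 (t : Int) 0
        = if t = x.toNat then g x else PySem.List.pyGetD L (t : Int) 0 := by
      rw [hL1, ← hxc, PySem.List.pyGetD_pySetD_natCast L _ _ _ _ (by omega), hxc]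
    rw [ihpt t ht, hget]
    by_cases hcase : t = x.toNat
    · have hxeq : (t : Int) = x := by rw [hcase]; exact hxc
      have hnotmem : (t : Int) ∉ xs := by rw [hxeq]; exact hxmem
      rw [if_neg hnotmem, if_pos hcase, if_pos (List.mem_cons.mpr (Or.inl hxeq)), hxeq]
    · have hne : (t : Int) ≠ x := fun h => hcase (by omega)
      rw [if_neg hcase]
      simp only [List.mem_cons, hne, false_or]

-- membership in the spf inner range (multiples of K from K up), in ℕ terms
lemma pvMemRangeSpf (N : Int) (K j : ℕ) (hK : 1 ≤ K) (hj : j < N.toNat) :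
    ((j : Int) ∈ PySem.List.pyRange ((K : Int)) N (K : Int)) ↔ (K ≤ j ∧ K ∣ j) := by
  have hKpos : (0 : Int) < (K : Int) := by exact_mod_cast hK
  rw [PySem.List.mem_pyRange_iff_of_pos hKpos]
  have hjN : (j : Int) < N := by
    have : (j : Int) < (N.toNat : Int) := by exact_mod_cast hj
    omega
  constructor
  · rintro ⟨h1, -, h3⟩
    have hdvd : (K : Int) ∣ (j : Int) := by
      have := dvd_add h3 (dvd_refl (K : Int))
      simpa using this
    exact ⟨by exact_mod_cast h1, by exact_mod_cast hdvd⟩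
  · rintro ⟨h1, h2⟩
    refine ⟨by exact_mod_cast h1, hjN, dvd_sub ?_ (dvd_refl (K : Int))⟩
    exact_mod_cast h2

-- the spf sieve step: processing i = K turns pvMinFacTo · K into pvMinFacTo · (K+1)
lemma pvSpfStep (N : Int) (K : ℕ) (hK : 2 ≤ K) (hKN : (K : Int) < N)
    (L : List Int) (hlen : L.length = N.toNat)
    (hpt : ∀ j, j < N.toNat → PySem.List.pyGetD L (j : Int) 0 = (pvMinFacTo j K : Int)) :
    (((fun s (i : Int) =>
      if PySem.List.pyGetD s i 0 == 0 then
        (PySem.List.pyRange i N i).foldl (fun s' j =>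
          if PySem.List.pyGetD s' j 0 == 0 then PySem.List.pySetD s' j i else s') s
      else s) : List Int → Int → List Int) L (K : Int)).length = N.toNat ∧
    ∀ j, j < N.toNat → PySem.List.pyGetD
      (((fun s (i : Int) =>
        if PySem.List.pyGetD s i 0 == 0 then
          (PySem.List.pyRange i N i).foldl (fun s' j =>
            if PySem.List.pyGetD s' j 0 == 0 then PySem.List.pySetD s' j i else s') s
        else s) : List Int → Int → List Int) L (K : Int)) (j : Int) 0
      = (pvMinFacTo j (K+1) : Int) := by
  have hKn : K < N.toNat := by omega
  have hcondval : PySem.List.pyGetD L (K : Int) 0 = (pvMinFacTo K K : Int) := hpt K hKn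
  have hKminFac2 : 2 ≤ K.minFac := (Nat.minFac_prime (by omega : K ≠ 1)).two_le
  simp only []
  by_cases hprime : K.Prime
  · -- spf[K] = 0 since minFac K = K is not < K
    have hmfK : K.minFac = K := (Nat.prime_def_minFac.mp hprime).2
    have hzero : pvMinFacTo K K = 0 := by
      unfold pvMinFacTo
      rw [if_neg (by omega)]
    rw [hcondval, hzero]
    simp only [Nat.cast_zero, beq_self_eq_true, if_true]
    have hKpos : (0 : Int) < (K : Int) := by exact_mod_cast (by omega : 0 < K)
    have hbounds : ∀ x ∈ PySem.List.pyRange ((K : Int)) N (K : Int), 0 ≤ x ∧ x < (N.toNat : Int) := by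
      intro x hx
      rw [PySem.List.mem_pyRange_iff_of_pos hKpos] at hx
      obtain ⟨h1, h2, -⟩ := hx
      constructor
      · omega
      · omega
    obtain ⟨hflen, hfpt⟩ := pvCondSetFold (K : Int) N.toNat
      (PySem.List.pyRange ((K : Int)) N (K : Int))
      (pvNodup_pyRange_of_pos _ _ hKpos) hbounds L hlen
    refine ⟨hflen, fun j hj => ?_⟩
    rw [hfpt j hj, hpt j hj]
    have hmemiff := pvMemRangeSpf N K j (by omega) hj
    by_cases hmem : ((j : Int) ∈ PySem.List.pyRange ((K : Int)) N (K : Int))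
    · obtain ⟨hjK, hdvd⟩ := hmemiff.mp hmem
      have hj2 : 2 ≤ j := by omega
      have hmfle : j.minFac ≤ K := Nat.minFac_le_of_dvd (by omega) hdvd
      by_cases hz : pvMinFacTo j K = 0
      · -- minFac j was not yet recorded: minFac j ≥ K, hence = K
        have hge : ¬ j.minFac < K := by
          intro hlt
          have h2f : 2 ≤ j.minFac := (Nat.minFac_prime (by omega : j ≠ 1)).two_le
          unfold pvMinFacTo at hz
          rw [if_pos ⟨hj2, hlt⟩] at hz
          omega
        have hmf : j.minFac = K := by omega
        rw [if_pos ⟨hmem, by rw [hz]; norm_num⟩]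
        unfold pvMinFacTo
        rw [if_pos ⟨hj2, by omega⟩, hmf]
      · -- already recorded: minFac j < K, value unchanged
        have hlt : j.minFac < K := by
          by_contra hge
          exact hz (by unfold pvMinFacTo; rw [if_neg (fun hh => hge hh.2)])
        rw [if_neg (fun hh => hz (by exact_mod_cast hh.2))]
        unfold pvMinFacTo
        rw [if_pos ⟨hj2, hlt⟩, if_pos ⟨hj2, by omega⟩]
    · -- j is not a multiple of K (or j < K): pvMinFacTo j K = pvMinFacTo j (K+1)
      rw [if_neg (fun hh => hmem hh.1)]
      unfold pvMinFacTo
      by_cases hj2 : 2 ≤ j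
      · have hne : j.minFac ≠ K := by
          intro heq
          have hdvd : K ∣ j := heq ▸ Nat.minFac_dvd j
          have hle : K ≤ j := Nat.le_of_dvd (by omega) hdvd
          exact hmem (hmemiff.mpr ⟨hle, hdvd⟩)
        by_cases hlt : j.minFac < K
        · rw [if_pos ⟨hj2, hlt⟩, if_pos ⟨hj2, by omega⟩]
        · rw [if_neg (fun hh => hlt hh.2), if_neg (fun hh => (by omega : ¬ j.minFac < K + 1) hh.2)]
      · rw [if_neg (fun hh => hj2 hh.1), if_neg (fun hh => hj2 hh.1)]
  · -- K composite: spf[K] = minFac K ≠ 0 already, nothing changes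
    have hlt : K.minFac < K := by
      rcases lt_or_eq_of_le (Nat.minFac_le (by omega : 0 < K)) with h | h
      · exact h
      · exact absurd (Nat.prime_def_minFac.mpr ⟨hK, h⟩) hprime
    have hval : pvMinFacTo K K = K.minFac := by
      unfold pvMinFacTo
      rw [if_pos ⟨hK, hlt⟩]
    have hcond : ((pvMinFacTo K K : Int) == 0) = false := by
      simp only [beq_eq_false_iff_ne, ne_eq, hval]
      exact_mod_cast (by omega : K.minFac ≠ 0)
    rw [hcondval]
    simp only [hcond, Bool.false_eq_true, if_false]
    refine ⟨hlen, fun j hj => ?_⟩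
    rw [hpt j hj]
    unfold pvMinFacTo
    by_cases hj2 : 2 ≤ j
    · have hne : j.minFac ≠ K := fun heq =>
        hprime (heq ▸ Nat.minFac_prime (by omega : j ≠ 1))
      by_cases hltj : j.minFac < K
      · rw [if_pos ⟨hj2, hltj⟩, if_pos ⟨hj2, by omega⟩]
      · rw [if_neg (fun hh => hltj hh.2), if_neg (fun hh => (by omega : ¬ j.minFac < K + 1) hh.2)]
    · rw [if_neg (fun hh => hj2 hh.1), if_neg (fun hh => hj2 hh.1)]

-- the spf sieve invariant
lemma pvSpfInv (N : Int) :
    ∀ K : ℕ, 2 ≤ K → (K : Int) ≤ N →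
    ((PySem.List.pyRange 2 (K : Int) 1).foldl (fun s i =>
      if PySem.List.pyGetD s i 0 == 0 then
        (PySem.List.pyRange i N i).foldl (fun s' j =>
          if PySem.List.pyGetD s' j 0 == 0 then PySem.List.pySetD s' j i else s') s
      else s) (List.replicate N.toNat 0)).length = N.toNat ∧
    ∀ j, j < N.toNat →
      PySem.List.pyGetD
        ((PySem.List.pyRange 2 (K : Int) 1).foldl (fun s i =>
          if PySem.List.pyGetD s i 0 == 0 then
            (PySem.List.pyRange i N i).foldl (fun s' j =>
              if PySem.List.pyGetD s' j 0 == 0 then PySem.List.pySetD s' j i else s') s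
          else s) (List.replicate N.toNat 0)) (j : Int) 0
        = (pvMinFacTo j K : Int) := by
  intro K
  induction K with
  | zero => omega
  | succ K ih =>
    intro hK2 hKN
    rcases Nat.lt_or_ge K 2 with hKlt | hKge
    · -- K+1 = 2: no iterations yet
      have hK1 : K = 1 := by omega
      subst hK1
      rw [show ((1:ℕ) + 1 : ℕ) = (2:ℕ) by rfl]
      rw [show (((2:ℕ) : Int)) = (2 : Int) by norm_num]
      rw [PySem.List.pyRange_one_eq_nil (by norm_num)]
      simp only [List.foldl_nil]
      refine ⟨by simp, fun j hj => ?_⟩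
      rw [PySem.List.pyGetD_natCast, List.getD_replicate _ hj]
      unfold pvMinFacTo
      by_cases hj2 : 2 ≤ j
      · have : 2 ≤ j.minFac := (Nat.minFac_prime (by omega : j ≠ 1)).two_le
        rw [if_neg (by omega)]
        norm_num
      · rw [if_neg (fun hh => hj2 hh.1)]
        norm_num
    · have hKN' : (K : Int) ≤ N := by push_cast at hKN ⊢; omega
      obtain ⟨ihlen, ihpt⟩ := ih hKge hKN'
      have hsplit : PySem.List.pyRange 2 ((K : Int) + 1) 1
          = PySem.List.pyRange 2 (K : Int) 1 ++ [(K : Int)] :=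
        PySem.List.pyRange_one_succ_right (by exact_mod_cast hKge)
      push_cast
      rw [hsplit, List.foldl_append, List.foldl_cons, List.foldl_nil]
      exact pvSpfStep N K hKge (by push_cast at hKN ⊢; omega) _ ihlen ihpt

-- pvStrip removes all factors p from m (p ≥ 2, m ≥ 1)
lemma pvStrip_spec (p : ℕ) (hp : 2 ≤ p) :
    ∀ m : ℕ, 0 < m → ∃ k m' : ℕ, pvStrip (p : Int) (m : Int) = (m' : Int) ∧
      m = p ^ k * m' ∧ ¬ p ∣ m' ∧ 0 < m' := by
  intro m
  induction m using Nat.strong_induction_on with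
  | _ m ih =>
    intro hm
    rw [pvStrip]
    by_cases hdvd : p ∣ m
    · have hcond : (PySem.Int.mod (m : Int) (p : Int) == 0) = true ∧ (2:Int) ≤ (p : Int) ∧ (0:Int) < (m : Int) := by
        refine ⟨?_, by exact_mod_cast hp, by exact_mod_cast hm⟩
        rw [PySem.Int.mod_natCast]
        have hz : m % p = 0 := by
          rcases hdvd with ⟨c, rfl⟩
          simp [Nat.mul_mod_right]
        simp [hz]
      rw [dif_pos hcond, PySem.Int.floordiv_natCast]
      have hmp_pos : 0 < m / p := Nat.div_pos (Nat.le_of_dvd hm hdvd) (by omega)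
      have hmp_lt : m / p < m := Nat.div_lt_self hm (by omega)
      obtain ⟨k, m', heq, hfact, hnd', hpos⟩ := ih (m / p) hmp_lt hmp_pos
      refine ⟨k+1, m', heq, ?_, hnd', hpos⟩
      have hmc : p * (m / p) = m := Nat.mul_div_cancel' hdvd
      calc m = p * (m / p) := hmc.symm
        _ = p * (p ^ k * m') := by rw [hfact]
        _ = p ^ (k+1) * m' := by ring
    · rw [dif_neg]
      · exact ⟨0, m, rfl, by ring, hdvd, hm⟩
      · rintro ⟨hmod, -, -⟩
        rw [PySem.Int.mod_natCast] at hmod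
        have : m % p = 0 := by
          simp only [beq_iff_eq] at hmod
          exact_mod_cast hmod
        exact hdvd (Nat.dvd_of_mod_eq_zero this)

-- the factorisation loop computes the radical from a correct spf table
lemma pvRadLoop_spec (spf : List Int) (n : ℕ)
    (hspf : ∀ t, 2 ≤ t → t < n → PySem.List.pyGetD spf (t : Int) 0 = (t.minFac : Int)) :
    ∀ m : ℕ, 0 < m → m < n → ∀ r : Int,
      pvRadLoop spf (m : Int) r = r * (pvRad m : Int) := by
  intro m
  induction m using Nat.strong_induction_on with
  | _ m ih =>
    intro hm hmn r
    rw [pvRadLoop]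
    by_cases hm1 : 1 < m
    · rw [if_pos (by exact_mod_cast hm1)]
      have hp : PySem.List.pyGetD spf ((m : ℕ) : Int) 0 = ((m.minFac : ℕ) : Int) :=
        hspf m (by omega) hmn
      have h2f : 2 ≤ m.minFac := (Nat.minFac_prime (by omega : m ≠ 1)).two_le
      obtain ⟨k, m', heq, hfact, hnd, hpos⟩ := pvStrip_spec m.minFac h2f m (by omega)
      have hk : k ≠ 0 := by
        rintro rfl
        simp only [pow_zero, one_mul] at hfact
        exact hnd (hfact ▸ Nat.minFac_dvd m)
      have hpk : 2 ≤ m.minFac ^ k := by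
        have := Nat.one_lt_pow hk (by omega : 1 < m.minFac)
        omega
      have hlt : m' < m := by nlinarith
      simp only [hp, heq]
      rw [dif_pos (by simp; omega)]
      rw [ih m' hlt hpos (by omega) (r * ((m.minFac : ℕ) : Int))]
      have hpf : m.primeFactors = insert m.minFac m'.primeFactors := by
        conv_lhs => rw [hfact]
        rw [Nat.primeFactors_mul (pow_ne_zero _ (by omega)) (by omega),
          Nat.primeFactors_prime_pow hk (Nat.minFac_prime (by omega : m ≠ 1)),
          Finset.singleton_union]
      have hnotmem : m.minFac ∉ m'.primeFactors := fun hmm =>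
        hnd (Nat.mem_primeFactors.mp hmm).2.1
      have hradm : pvRad m = m.minFac * pvRad m' := by
        unfold pvRad
        rw [hpf, Finset.prod_insert hnotmem]
      rw [hradm]
      push_cast
      ring
    · have : m = 1 := by omega
      subst this
      rw [if_neg (by norm_num)]
      simp [pvRad]

lemma pvRad_zero : pvRad 0 = 1 := by simp [pvRad]

lemma pvRad_one : pvRad 1 = 1 := by simp [pvRad]

lemma pvAlt_eq_map (N : Int) :
    Rad_Sieve_alt N = (List.range N.toNat).map (fun j => (pvRad j : Int)) := by
  unfold Rad_Sieve_alt
  by_cases hN2 : N < 2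
  · rw [PySem.List.pyRange_one_eq_nil (by omega)]
    simp only [List.foldl_nil]
    have : N.toNat = 0 ∨ N.toNat = 1 := by omega
    rcases this with h | h <;> rw [h]
    · rfl
    · simp [pvRad_zero]
  · have hN : 2 ≤ N := by omega
    have hcast : ((N.toNat : ℕ) : Int) = N := Int.toNat_of_nonneg (by omega)
    rw [show PySem.List.pyRange 2 N 1 = PySem.List.pyRange 2 ((N.toNat : ℕ) : Int) 1 by rw [hcast]]
    set spfV := (PySem.List.pyRange 2 ((N.toNat : ℕ) : Int) 1).foldl (fun s i =>
      if PySem.List.pyGetD s i 0 == 0 then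
        (PySem.List.pyRange i N i).foldl (fun s' j =>
          if PySem.List.pyGetD s' j 0 == 0 then PySem.List.pySetD s' j i else s') s
      else s) (List.replicate N.toNat (0 : Int)) with hspfV
    obtain ⟨hslen, hspt⟩ := pvSpfInv N N.toNat (by omega) (by omega)
    have hspfOK : ∀ t, 2 ≤ t → t < N.toNat →
        PySem.List.pyGetD spfV ((t : ℕ) : Int) 0 = ((t.minFac : ℕ) : Int) := by
      intro t h2 hlt
      rw [hspfV, hspt t hlt]
      have hmf : t.minFac ≤ t := Nat.minFac_le (by omega)
      unfold pvMinFacTo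
      rw [if_pos ⟨h2, by omega⟩]
    have hbounds : ∀ x ∈ PySem.List.pyRange 2 ((N.toNat : ℕ) : Int) 1, 0 ≤ x ∧ x < ((N.toNat : ℕ) : Int) := by
      intro x hx
      rw [PySem.List.mem_pyRange_one] at hx
      exact ⟨by omega, hx.2⟩
    obtain ⟨hrlen, hrpt⟩ := pvSetFold (fun j => pvRadLoop spfV j 1) N.toNat
      (PySem.List.pyRange 2 ((N.toNat : ℕ) : Int) 1)
      (PySem.List.nodup_pyRange_one _ _) hbounds
      (List.replicate N.toNat 1) (by simp)
    apply List.ext_getElem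
    · rw [hrlen, List.length_map, List.length_range]
    · intro t h1 h2
      have ht : t < N.toNat := by
        rw [List.length_map, List.length_range] at h2
        exact h2
      have hval := hrpt t ht
      rw [PySem.List.pyGetD_natCast, List.getD_eq_getElem _ _ (by omega)] at hval
      rw [hval]
      simp only [List.getElem_map, List.getElem_range]
      by_cases h2t : 2 ≤ t
      · rw [if_pos (PySem.List.mem_pyRange_one.mpr ⟨by exact_mod_cast h2t, by exact_mod_cast ht⟩)]
        rw [pvRadLoop_spec spfV N.toNat hspfOK t (by omega) ht 1, one_mul]
      · rw [if_neg (fun hmem => h2t (by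
          have := (PySem.List.mem_pyRange_one.mp hmem).1
          exact_mod_cast this))]
        rw [PySem.List.pyGetD_natCast, List.getD_replicate _ ht]
        have : t = 0 ∨ t = 1 := by omega
        rcases this with rfl | rfl
        · rw [pvRad_zero]; rfl
        · rw [pvRad_one]; rfl

-- ===== VERDICT (by name: the statement is the Claim_ definition above) =====
theorem Rad_Sieve_spec : Claim_equal_Rad_Sieve := by
  intro N _
  unfold Spec_Rad_Sieve
  rw [pvA_eq_map, pvAlt_eq_map]
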